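-- pv_equiv track=rewrite | github.com/chrishop/tap-hack | check.py | generate_batch_queue
-- ===== SOURCE A (Python) =====
-- def generate_batch_queue(the_min, the_max, batch_size):
--     queue = [[the_min, the_min]]
--     batch_min = the_min
--     batch_max = the_min
--
--     iterations = int((the_max - the_min) / batch_size)
--     for _ in range(iterations):
--         batch_min = batch_max
--         batch_max = batch_max + batch_size
--         queue.append([batch_min, batch_max])
--
--     remainder = (the_max - the_min) % batch_size
--     if remainder != 0:
--         queue.append([batch_max, batch_max + remainder])
--     return queue
-- ===== SOURCE B (Python) =====
-- def generate_batch_queue(the_min, the_max, batch_size):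
--     span = the_max - the_min
--     n = max(int(span / batch_size), 0)
--     remainder = span % batch_size
--     total = 1 + n + (1 if remainder != 0 else 0)
--
--     def interval(j):
--         # j-th output interval, computed directly from its index (no sequential state)
--         if j == 0:
--             return [the_min, the_min]
--         if j <= n:
--             lo = the_min + (j - 1) * batch_size
--             return [lo, lo + batch_size]
--         last = the_min + n * batch_size
--         return [last, last + remainder]
--
--     return [interval(j) for j in range(total)]
-- ===== Notes on version B (the rewrite author's own statement) =====
-- stated objective: alternative
-- what changed: A threads batch_min/batch_max state through an append loop; B computes the output size up front and maps a closed-form index-to-interval function over range(total), so each interval is computed independently from its index with no sequential state.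
import Mathlib
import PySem

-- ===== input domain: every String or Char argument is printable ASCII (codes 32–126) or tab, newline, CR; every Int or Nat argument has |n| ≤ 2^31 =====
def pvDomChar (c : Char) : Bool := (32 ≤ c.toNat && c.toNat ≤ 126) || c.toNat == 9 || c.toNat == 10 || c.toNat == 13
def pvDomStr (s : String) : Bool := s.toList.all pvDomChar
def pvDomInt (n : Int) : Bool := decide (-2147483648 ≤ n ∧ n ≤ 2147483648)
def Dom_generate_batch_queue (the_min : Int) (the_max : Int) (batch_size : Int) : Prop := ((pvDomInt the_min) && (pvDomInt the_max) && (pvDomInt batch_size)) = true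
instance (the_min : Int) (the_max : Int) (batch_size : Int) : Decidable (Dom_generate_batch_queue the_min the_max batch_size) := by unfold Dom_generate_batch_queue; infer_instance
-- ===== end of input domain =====

-- B replaces A's stateful append loop by a closed-form index→interval function mapped
-- over range(total): each output element is computed independently from its index
-- (objective: alternative, same O(n) cost).

-- ===== PORT A =====
-- int((the_max - the_min) / batch_size): on Dom the quotient magnitudes are far below 2^53,
-- so the float division is correctly rounded and int() truncates it to Int.tdiv (exact on Dom).
def generate_batch_queue (the_min : Int) (the_max : Int) (batch_size : Int) : List (List Int) :=
  let iterations := Int.tdiv (the_max - the_min) batch_size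
  let st := (PySem.List.pyRange 0 iterations 1).foldl
    (fun (st : List (List Int) × Int × Int) _ =>
      let batch_min := st.2.2
      let batch_max := st.2.2 + batch_size
      (st.1 ++ [[batch_min, batch_max]], batch_min, batch_max))
    ([[the_min, the_min]], the_min, the_min)
  let remainder := PySem.Int.mod (the_max - the_min) batch_size
  if remainder ≠ 0 then st.1 ++ [[st.2.2, st.2.2 + remainder]] else st.1

-- ===== PORT B =====
def generate_batch_queue_alt (the_min : Int) (the_max : Int) (batch_size : Int) : List (List Int) :=
  let span := the_max - the_min
  let n := max (Int.tdiv span batch_size) 0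
  let remainder := PySem.Int.mod span batch_size
  let total := 1 + n + (if remainder ≠ 0 then 1 else 0)
  (PySem.List.pyRange 0 total 1).map (fun j =>
    if j = 0 then [the_min, the_min]
    else if j ≤ n then [the_min + (j - 1) * batch_size, the_min + (j - 1) * batch_size + batch_size]
    else [the_min + n * batch_size, the_min + n * batch_size + remainder])

-- ===== PRECONDITION & SPEC =====
-- A raises ZeroDivisionError when batch_size = 0 (and so does B); excluded.
def Pre_generate_batch_queue (the_min : Int) (the_max : Int) (batch_size : Int) : Prop := batch_size ≠ 0
instance (the_min : Int) (the_max : Int) (batch_size : Int) : Decidable (Pre_generate_batch_queue the_min the_max batch_size) := by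
  unfold Pre_generate_batch_queue; infer_instance
def pvWitness_generate_batch_queue : Int × Int × Int := (0, 10, 3)

def Spec_generate_batch_queue (the_min : Int) (the_max : Int) (batch_size : Int) (out : List (List Int)) : Prop := out = generate_batch_queue_alt the_min the_max batch_size
instance (the_min : Int) (the_max : Int) (batch_size : Int) (out : List (List Int)) : Decidable (Spec_generate_batch_queue the_min the_max batch_size out) := by unfold Spec_generate_batch_queue; infer_instance

-- ===== CLAIM (what is proved, stated in full; the proofs are below) =====
def Claim_equal_generate_batch_queue : Prop := ∀ (the_min : Int) (the_max : Int) (batch_size : Int), Dom_generate_batch_queue the_min the_max batch_size → Pre_generate_batch_queue the_min the_max batch_size → Spec_generate_batch_queue the_min the_max batch_size (generate_batch_queue the_min the_max batch_size)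

-- ===== LEMMAS AND PROOFS =====

-- A's loop ignores the range elements: foldl = iterate by the length.
theorem foldl_ignore {α β : Type} (f : α → α) (l : List β) (s : α) :
    l.foldl (fun a _ => f a) s = f^[l.length] s := by
  induction l generalizing s with
  | nil => rfl
  | cons x t ih => simpa [Function.iterate_succ_apply] using ih (f s)

-- Closed form of A's loop state after n steps.
theorem iterateA (bs : Int) (n : Nat) (m : Int) :
    (fun (st : List (List Int) × Int × Int) =>
        (st.1 ++ [[st.2.2, st.2.2 + bs]], st.2.2, st.2.2 + bs))^[n] ([[m, m]], m, m) =
      ([[m, m]] ++ (List.range n).map (fun i : Nat => [m + (i : Int) * bs, m + ((i : Int) + 1) * bs]),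
        (if n = 0 then m else m + ((n : Int) - 1) * bs), m + (n : Int) * bs) := by
  induction n with
  | zero => simp
  | succ k ih =>
    rw [Function.iterate_succ_apply', ih]
    cases k with
    | zero => simp [List.range_succ]
    | succ j =>
      simp [List.range_succ]
      ring_nf

theorem map_pyRange_nat (g : Int → List Int) (n : Nat) :
    ((PySem.List.pyRange 0 (n : Int) 1).map g) = (List.range n).map (fun k : Nat => g (k : Int)) := by
  have h : ((n : Int) - 0).toNat = n := by simp
  rw [PySem.List.pyRange_one, h, List.map_map]
  apply List.map_congr_left
  intro a _
  simp

-- B's index formula, mapped over the first n+1 indices, produces the sentinel plus the n main intervals.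
theorem map_range_interval (m bs rem : Int) (N : Nat) :
    (List.range (N + 1)).map (fun k : Nat =>
        if (k : Int) = 0 then [m, m]
        else if (k : Int) ≤ (N : Int) then [m + ((k : Int) - 1) * bs, m + ((k : Int) - 1) * bs + bs]
        else [m + (N : Int) * bs, m + (N : Int) * bs + rem]) =
      [m, m] :: (List.range N).map (fun i : Nat => [m + (i : Int) * bs, m + ((i : Int) + 1) * bs]) := by
  rw [List.range_succ_eq_map, List.map_cons, List.map_map]
  simp only [Int.natCast_zero, if_pos rfl]
  congr 1
  apply List.map_congr_left
  intro a ha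
  have hlt : a < N := List.mem_range.mp ha
  have h0 : ((a + 1 : Nat) : Int) ≠ 0 := by push_cast; omega
  have hle : ((a + 1 : Nat) : Int) ≤ (N : Int) := by push_cast; omega
  simp only [Function.comp, if_neg h0, if_pos hle]
  push_cast
  ring_nf

theorem main_eq (the_min the_max batch_size : Int) :
    generate_batch_queue the_min the_max batch_size =
      generate_batch_queue_alt the_min the_max batch_size := by
  unfold generate_batch_queue generate_batch_queue_alt
  simp only []
  set span := the_max - the_min with hspan
  set it := Int.tdiv span batch_size with hit
  set N := it.toNat with hN
  set rem := PySem.Int.mod span batch_size with hrem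
  have hmax : max it 0 = (N : Int) := by
    by_cases h0 : it ≤ 0
    · simp [hN, Int.toNat_of_nonpos h0, max_eq_right h0]
    · push Not at h0
      rw [max_eq_left h0.le, hN, Int.toNat_of_nonneg h0.le]
  have hlen : (PySem.List.pyRange 0 it 1).length = N := by
    rw [PySem.List.length_pyRange_one]; simp [hN]
  rw [foldl_ignore, hlen, iterateA batch_size N the_min, hmax]
  by_cases hr : rem ≠ 0
  · -- total = N + 2
    have htot : (1 : Int) + (N : Int) + (if rem ≠ 0 then (1:Int) else 0) = ((N + 2 : Nat) : Int) := by
      rw [if_pos hr]; push_cast; ring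
    rw [htot, map_pyRange_nat]
    rw [if_pos hr]
    have : N + 2 = (N + 1) + 1 := rfl
    rw [this, List.range_succ, List.map_append, map_range_interval the_min batch_size rem N]
    have h0 : ((N + 1 : Nat) : Int) ≠ 0 := by push_cast; omega
    have hnle : ¬ ((N + 1 : Nat) : Int) ≤ (N : Int) := by push_cast; omega
    simp [if_neg h0, if_neg hnle]
  · have htot : (1 : Int) + (N : Int) + (if rem ≠ 0 then (1:Int) else 0) = ((N + 1 : Nat) : Int) := by
      rw [if_neg hr]; push_cast; ring
    rw [htot, map_pyRange_nat, if_neg hr, map_range_interval the_min batch_size rem N]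
    simp

-- ===== VERDICT (by name: the statement is the Claim_ definition above) =====
theorem generate_batch_queue_spec : Claim_equal_generate_batch_queue := by
  intro m M bs _ _
  unfold Spec_generate_batch_queue
  exact main_eq m M bs
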